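-- pv_equiv track=rewrite | github.com/scikit-hep/awkward | awkward1/_pandas.py | extra
-- ===== SOURCE A (Python) =====
-- def extra(args, kwargs, defaults):
--     out = []
--     for i in range(len(defaults)):
--         name, default = defaults[i]
--         if i < len(args):
--             out.append(args[i])
--         elif name in kwargs:
--             out.append(kwargs[name])
--         else:
--             out.append(default)
--     return out
-- ===== SOURCE B (Python) =====
-- def extra(args, kwargs, defaults):
--     # Structural recursion co-consuming args and defaults (no indices, no range).
--     if not defaults:
--         return []
--     name, default = defaults[0]
--     head = args[0] if args else kwargs.get(name, default)
--     return [head] + extra(args[1:], kwargs, defaults[1:])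
-- ===== Notes on version B (the rewrite author's own statement) =====
-- stated objective: alternative
-- what changed: A's index-driven loop over range(len(defaults)) with per-index subscripting and a membership test is replaced by structural recursion that co-consumes the args and defaults lists head-first, emitting one element per recursive step with kwargs.get once args is exhausted.
import Mathlib
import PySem

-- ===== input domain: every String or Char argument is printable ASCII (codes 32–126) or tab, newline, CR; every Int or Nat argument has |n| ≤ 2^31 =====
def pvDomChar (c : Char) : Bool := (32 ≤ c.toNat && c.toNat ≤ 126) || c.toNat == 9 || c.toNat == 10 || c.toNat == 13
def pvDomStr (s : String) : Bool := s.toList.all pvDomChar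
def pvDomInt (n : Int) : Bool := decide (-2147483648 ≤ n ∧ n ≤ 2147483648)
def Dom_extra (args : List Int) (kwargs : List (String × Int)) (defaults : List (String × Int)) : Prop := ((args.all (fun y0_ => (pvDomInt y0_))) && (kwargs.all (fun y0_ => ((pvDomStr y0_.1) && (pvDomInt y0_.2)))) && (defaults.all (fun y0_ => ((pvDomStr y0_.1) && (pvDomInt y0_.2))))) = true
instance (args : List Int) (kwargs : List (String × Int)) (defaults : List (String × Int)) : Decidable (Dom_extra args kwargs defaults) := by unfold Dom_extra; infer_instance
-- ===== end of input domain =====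

-- B replaces A's index-driven loop (range + subscripting + membership test) by structural
-- recursion co-consuming the args and defaults lists head-first (alternative decomposition).

-- ===== PORT A =====
-- for i in range(len(defaults)): name,default = defaults[i]; branch on i < len(args) / name in kwargs
def extra (args : List Int) (kwargs : List (String × Int)) (defaults : List (String × Int)) : List Int :=
  (PySem.List.pyRange 0 (defaults.length : Int)).foldl
    (fun out i =>
      -- name, default = defaults[i]  (i is always in range here; the pair is read where used)
      if i < (args.length : Int) then
        out ++ [PySem.List.pyGetD args i 0]            -- args[i]; in range under the guard
      else if (PySem.Dict.mk kwargs).contains (PySem.List.pyGetD defaults i ("", 0)).1 then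
        out ++ [((PySem.Dict.mk kwargs).get? (PySem.List.pyGetD defaults i ("", 0)).1).getD 0]   -- kwargs[name]
      else
        out ++ [(PySem.List.pyGetD defaults i ("", 0)).2]) []

-- ===== PORT B =====
-- if not defaults: []; head = args[0] if args else kwargs.get(name, default); [head] + recurse on tails
def extra_alt (args : List Int) (kwargs : List (String × Int)) (defaults : List (String × Int)) : List Int :=
  match defaults, args with
  | [], _ => []
  | (_name, _default) :: ds, a :: as_ => a :: extra_alt as_ kwargs ds
  | (name, default) :: ds, [] => (PySem.Dict.mk kwargs).getD name default :: extra_alt [] kwargs ds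

-- ===== PRECONDITION & SPEC =====
def Spec_extra (args : List Int) (kwargs : List (String × Int)) (defaults : List (String × Int)) (out : List Int) : Prop := out = extra_alt args kwargs defaults
instance (args : List Int) (kwargs : List (String × Int)) (defaults : List (String × Int)) (out : List Int) : Decidable (Spec_extra args kwargs defaults out) := by unfold Spec_extra; infer_instance

-- ===== CLAIM (what is proved, stated in full; the proofs are below) =====
def Claim_equal_extra : Prop := ∀ (args : List Int) (kwargs : List (String × Int)) (defaults : List (String × Int)), Dom_extra args kwargs defaults → Spec_extra args kwargs defaults (extra args kwargs defaults)

-- ===== LEMMAS AND PROOFS =====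

-- the one element A's loop body appends at index i, as a function of i
def pvBody (args : List Int) (kwargs : List (String × Int)) (defaults : List (String × Int)) (i : Int) : Int :=
  if i < (args.length : Int) then PySem.List.pyGetD args i 0
  else (PySem.Dict.mk kwargs).getD (PySem.List.pyGetD defaults i ("", 0)).1
         (PySem.List.pyGetD defaults i ("", 0)).2

-- A's loop body always appends exactly one element: the fold is a map over the index range.
theorem extra_eq_map (args : List Int) (kwargs : List (String × Int)) (defaults : List (String × Int)) :
    extra args kwargs defaults =
      (List.range defaults.length).map (fun (j : Nat) => pvBody args kwargs defaults (j : Int)) := by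
  unfold extra
  have h1 :
      (PySem.List.pyRange 0 (defaults.length : Int)).foldl
        (fun out i =>
          if i < (args.length : Int) then
            out ++ [PySem.List.pyGetD args i 0]
          else if (PySem.Dict.mk kwargs).contains (PySem.List.pyGetD defaults i ("", 0)).1 then
            out ++ [((PySem.Dict.mk kwargs).get? (PySem.List.pyGetD defaults i ("", 0)).1).getD 0]
          else
            out ++ [(PySem.List.pyGetD defaults i ("", 0)).2]) [] =
      (PySem.List.pyRange 0 (defaults.length : Int)).foldl
        (fun out i => out ++ [pvBody args kwargs defaults i]) [] := by
    refine PySem.List.foldl_congr_mem _ _ _ _ ?_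
    intro out i _
    simp only [pvBody]
    split_ifs with h1 h2
    · rfl
    · rw [PySem.Dict.getD_eq_get?_getD]
      have hg := PySem.Dict.contains_eq_isSome_get? (PySem.Dict.mk kwargs)
        (PySem.List.pyGetD defaults i ("", 0)).1
      rw [hg] at h2
      rcases Option.isSome_iff_exists.mp h2 with ⟨v, hv⟩
      rw [hv]
      rfl
    · rw [PySem.Dict.getD_of_not_contains _ _
        (by simp only [Bool.not_eq_true] at h2; exact h2)]
  rw [h1, PySem.List.foldl_append_singleton_eq_map, PySem.List.pyRange_zero_natCast,
    List.map_map]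
  rfl

-- B's recursion computes the positional prefix followed by the defaults-tail filled from kwargs.
theorem extra_alt_eq (args : List Int) (kwargs : List (String × Int)) (defaults : List (String × Int)) :
    extra_alt args kwargs defaults =
      args.take defaults.length ++
        (defaults.drop args.length).map (fun nd => (PySem.Dict.mk kwargs).getD nd.1 nd.2) := by
  induction defaults generalizing args with
  | nil => simp [extra_alt]
  | cons nd ds ih =>
    obtain ⟨name, default⟩ := nd
    cases args with
    | nil => simp [extra_alt, ih]
    | cons a as_ => simp [extra_alt, ih as_]

-- ===== VERDICT (by name: the statement is the Claim_ definition above) =====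
theorem extra_spec : Claim_equal_extra := by
  intro args kwargs defaults _
  unfold Spec_extra
  rw [extra_eq_map, extra_alt_eq]
  apply List.ext_getElem?
  intro j
  rw [List.getElem?_map]
  by_cases hj : j < defaults.length
  · rw [List.getElem?_range hj]
    by_cases h : j < args.length
    · rw [List.getElem?_append_left (by simp; omega)]
      simp only [Option.map_some, List.getElem?_take, if_pos hj, pvBody,
        if_pos (show (j : Int) < (args.length : Int) by exact_mod_cast h),
        PySem.List.pyGetD_natCast, List.getD_eq_getElem?_getD,
        List.getElem?_eq_getElem h, Option.getD_some]
    · rw [List.getElem?_append_right (by simp; omega)]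
      simp only [Option.map_some, pvBody,
        if_neg (show ¬ (j : Int) < (args.length : Int) by exact_mod_cast h),
        PySem.List.pyGetD_natCast, List.getD_eq_getElem?_getD,
        List.getElem?_eq_getElem hj, Option.getD_some,
        List.getElem?_map, List.getElem?_drop, List.length_take]
      have hidx : args.length + (j - min defaults.length args.length) = j := by omega
      rw [hidx, List.getElem?_eq_getElem hj, Option.map_some]
  · rw [List.getElem?_eq_none (by simpa using hj), Option.map_none,
      Eq.comm, List.getElem?_eq_none]
    simp
    omega
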